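-- pv_equiv track=rewrite | github.com/oyjoh/advent-of-code-2020 | day16/day16.py | fit_rules
-- ===== SOURCE A (Python) =====
-- def fit_rules(column, rules):
--     valid_rules = []
--
--     for idx, rule in enumerate(rules):
--         passing = True
--         for num in column:
--             if num not in rule[0] and num not in rule[1]:
--                 passing = False
--                 break
--         if passing:
--             valid_rules.append(idx)
--
--     return valid_rules
-- ===== SOURCE B (Python) =====
-- def fit_rules(column, rules):
--     # Candidate elimination: start with all (index, rule) pairs and filter
--     # by each column value, stopping early once no candidates survive.
--     candidates = list(enumerate(rules))
--     for num in column: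
--         candidates = [(i, r) for (i, r) in candidates if num in r[0] or num in r[1]]
--         if not candidates:
--             break
--     return [i for (i, _) in candidates]
-- ===== Notes on version B (the rewrite author's own statement) =====
-- stated objective: alternative
-- what changed: Swapped the loop nesting: instead of testing every rule against the whole column with an inner break, B filters a shrinking candidate set of (index, rule) pairs once per column value and stops early when no candidates remain.
import Mathlib
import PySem

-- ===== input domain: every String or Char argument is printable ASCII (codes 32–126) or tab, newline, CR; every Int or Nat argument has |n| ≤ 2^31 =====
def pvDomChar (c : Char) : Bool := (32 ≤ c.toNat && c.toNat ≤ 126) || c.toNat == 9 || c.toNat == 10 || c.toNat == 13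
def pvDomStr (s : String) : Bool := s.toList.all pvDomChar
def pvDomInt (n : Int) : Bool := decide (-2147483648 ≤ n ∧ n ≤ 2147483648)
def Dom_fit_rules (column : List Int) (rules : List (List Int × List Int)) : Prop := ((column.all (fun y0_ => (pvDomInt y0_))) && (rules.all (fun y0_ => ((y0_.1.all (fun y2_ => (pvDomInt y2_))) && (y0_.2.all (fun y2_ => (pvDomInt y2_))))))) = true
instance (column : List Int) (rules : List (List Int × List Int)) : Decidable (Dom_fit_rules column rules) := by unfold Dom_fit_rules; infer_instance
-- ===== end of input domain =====

-- B swaps the loop nesting: a shrinking candidate set of (index, rule) pairs is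
-- filtered once per column value, with an early exit when it becomes empty.

-- ===== PORT A =====
-- inner 'for num in column' loop with break: false at the first num in neither range
def fitA_pass (rule : List Int × List Int) : List Int → Bool
  | [] => true
  | n :: rest => if n ∉ rule.1 ∧ n ∉ rule.2 then false else fitA_pass rule rest

-- outer 'for idx, rule in enumerate(rules)' loop, appending passing indices
def fitA_loop (column : List Int) : Int → List (List Int × List Int) → List Int → List Int
  | _, [], acc => acc
  | idx, r :: rs, acc =>
      fitA_loop column (idx + 1) rs (if fitA_pass r column then acc ++ [idx] else acc)

def fit_rules (column : List Int) (rules : List (List Int × List Int)) : List Int :=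
  fitA_loop column 0 rules []

-- ===== PORT B =====
-- list(enumerate(rules)) with Python int indices
def fitB_enum : Int → List (List Int × List Int) → List (Int × (List Int × List Int))
  | _, [] => []
  | idx, r :: rs => (idx, r) :: fitB_enum (idx + 1) rs

-- 'for num in column' loop: filter candidates, break when empty
def fitB_loop : List Int → List (Int × (List Int × List Int)) → List (Int × (List Int × List Int))
  | [], cands => cands
  | n :: rest, cands =>
      let cands' := cands.filter (fun p => decide (n ∈ p.2.1) || decide (n ∈ p.2.2))
      if cands' = [] then cands' else fitB_loop rest cands'

def fit_rules_alt (column : List Int) (rules : List (List Int × List Int)) : List Int :=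
  (fitB_loop column (fitB_enum 0 rules)).map (fun p => p.1)

-- ===== PRECONDITION & SPEC =====
def Spec_fit_rules (column : List Int) (rules : List (List Int × List Int)) (out : List Int) : Prop := out = fit_rules_alt column rules
instance (column : List Int) (rules : List (List Int × List Int)) (out : List Int) : Decidable (Spec_fit_rules column rules out) := by unfold Spec_fit_rules; infer_instance

-- ===== CLAIM (what is proved, stated in full; the proofs are below) =====
def Claim_equal_fit_rules : Prop := ∀ (column : List Int) (rules : List (List Int × List Int)), Dom_fit_rules column rules → Spec_fit_rules column rules (fit_rules column rules)

-- ===== LEMMAS AND PROOFS =====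

-- A's pass test splits as: the head value's membership test AND the pass test on the rest
theorem fitA_pass_cons (r : List Int × List Int) (n : Int) (rest : List Int) :
    fitA_pass r (n :: rest)
      = ((decide (n ∈ r.1) || decide (n ∈ r.2)) && fitA_pass r rest) := by
  by_cases h1 : n ∈ r.1 <;> by_cases h2 : n ∈ r.2 <;>
    simp [fitA_pass, h1, h2]

-- B's loop computes the filter of the candidates by A's pass test (the early break
-- is sound: every filter of the empty list is empty)
theorem fitB_loop_eq_filter (column : List Int) :
    ∀ cands : List (Int × (List Int × List Int)),
      fitB_loop column cands = cands.filter (fun p => fitA_pass p.2 column) := by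
  induction column with
  | nil => intro cands; simp [fitB_loop, fitA_pass]
  | cons n rest ih =>
      intro cands
      simp only [fitB_loop]
      split
      · next h =>
          rw [show (List.filter (fun p => fitA_pass p.2 (n :: rest)) cands)
                = List.filter (fun p => fitA_pass p.2 rest)
                    (List.filter (fun p => decide (n ∈ p.2.1) || decide (n ∈ p.2.2)) cands) from ?_]
          · rw [h]; rfl
          · rw [List.filter_filter]
            apply List.filter_congr
            intro p _
            rw [fitA_pass_cons p.2 n rest, Bool.and_comm]
      · next h =>
          rw [ih, List.filter_filter]
          apply List.filter_congr
          intro p _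
          rw [fitA_pass_cons p.2 n rest, Bool.and_comm]

-- A's accumulator loop equals acc ++ map-fst of the filtered enumeration
theorem fitA_loop_eq (column : List Int) :
    ∀ (rs : List (List Int × List Int)) (idx : Int) (acc : List Int),
      fitA_loop column idx rs acc
        = acc ++ ((fitB_enum idx rs).filter (fun p => fitA_pass p.2 column)).map (fun p => p.1) := by
  intro rs
  induction rs with
  | nil => intro idx acc; simp [fitA_loop, fitB_enum]
  | cons r rs ih =>
      intro idx acc
      simp only [fitA_loop, fitB_enum, List.filter_cons]
      by_cases h : fitA_pass r column
      · simp [h, ih]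
      · simp [h, ih]

-- ===== VERDICT (by name: the statement is the Claim_ definition above) =====
theorem fit_rules_spec : Claim_equal_fit_rules := by
  intro column rules _
  unfold Spec_fit_rules fit_rules fit_rules_alt
  rw [fitA_loop_eq, fitB_loop_eq_filter, List.nil_append]
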